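-- pv_equiv track=rewrite | github.com/friha438/MSc_MT | scoring_shifts.py | score_nr_nights
-- ===== SOURCE A (Python) =====
-- def score_nr_nights(nights):
--     score = []
--     for n in nights:
--         if n < 3:
--             score.append(3)
--         elif (n > 2) and (n < 5):
--             score.append(2)
--         elif (n > 4) and (n < 9):
--             score.append(1)
--         else:
--             score.append(0)
--     return score
-- ===== SOURCE B (Python) =====
-- import bisect
--
-- _BOUNDS = [3, 5, 9]
-- _SCORES = [3, 2, 1, 0]
--
-- def score_nr_nights(nights):
--     return [_SCORES[bisect.bisect_right(_BOUNDS, n)] for n in nights]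
-- ===== Notes on version B (the rewrite author's own statement) =====
-- stated objective: idiomatic
-- what changed: Replaces the if/elif comparison ladder and append loop with a comprehension that binary-searches (bisect_right) a static table of threshold bounds and indexes a static table of scores.
import Mathlib
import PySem

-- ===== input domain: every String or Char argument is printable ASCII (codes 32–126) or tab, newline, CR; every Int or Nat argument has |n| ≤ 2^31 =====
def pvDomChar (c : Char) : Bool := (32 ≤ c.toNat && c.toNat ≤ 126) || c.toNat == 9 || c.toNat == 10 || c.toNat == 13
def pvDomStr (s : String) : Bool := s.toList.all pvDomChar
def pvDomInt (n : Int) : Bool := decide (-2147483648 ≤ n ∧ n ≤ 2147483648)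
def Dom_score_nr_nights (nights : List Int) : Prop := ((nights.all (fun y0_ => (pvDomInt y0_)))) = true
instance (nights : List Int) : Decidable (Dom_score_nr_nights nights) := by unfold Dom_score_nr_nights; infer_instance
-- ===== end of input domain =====

-- ===== PORT A =====
-- B replaces A's if/elif ladder with a bisect_right lookup in a static threshold table (idiomatic).
def score_nr_nights (nights : List Int) : List Int :=
  nights.foldl (fun score n =>
    if n < 3 then score ++ [3]
    else if n > 2 ∧ n < 5 then score ++ [2]
    else if n > 4 ∧ n < 9 then score ++ [1]
    else score ++ [0]) []

-- ===== PORT B =====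
def pvBounds : List Int := [3, 5, 9]
def pvScores : List Int := [3, 2, 1, 0]
def score_nr_nights_alt (nights : List Int) : List Int :=
  nights.map (fun n => pvScores.getD (PySem.List.bisectRight pvBounds n) 0)

-- ===== PRECONDITION & SPEC =====
def Spec_score_nr_nights (nights : List Int) (out : List Int) : Prop := out = score_nr_nights_alt nights
instance (nights : List Int) (out : List Int) : Decidable (Spec_score_nr_nights nights out) := by unfold Spec_score_nr_nights; infer_instance

-- ===== CLAIM (what is proved, stated in full; the proofs are below) =====
def Claim_equal_score_nr_nights : Prop := ∀ (nights : List Int), Dom_score_nr_nights nights → Spec_score_nr_nights nights (score_nr_nights nights)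

-- ===== LEMMAS AND PROOFS =====

-- ===== VERDICT (by name: the statement is the Claim_ definition above) =====
lemma pvBisect_eq (n : Int) :
    pvScores.getD (PySem.List.bisectRight pvBounds n) 0 =
      if n < 3 then 3 else if n > 2 ∧ n < 5 then 2 else if n > 4 ∧ n < 9 then 1 else 0 := by
  unfold pvBounds pvScores PySem.List.bisectRight
  split_ifs with h1 h2 h3
  · simp [PySem.List.bisectRightLoop, h1, show n < 5 by omega]
  · simp [PySem.List.bisectRightLoop, show ¬ n < 3 by omega, show n < 5 by omega]
  · simp [PySem.List.bisectRightLoop, show ¬ n < 5 by omega, show n < 9 by omega]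
  · simp [PySem.List.bisectRightLoop, show ¬ n < 5 by omega, show ¬ n < 9 by omega]

lemma pvFoldl_eq (nights : List Int) (acc : List Int) :
    nights.foldl (fun score n =>
      if n < 3 then score ++ [3]
      else if n > 2 ∧ n < 5 then score ++ [2]
      else if n > 4 ∧ n < 9 then score ++ [1]
      else score ++ [0]) acc
    = acc ++ nights.map (fun n => pvScores.getD (PySem.List.bisectRight pvBounds n) 0) := by
  induction nights generalizing acc with
  | nil => simp
  | cons h t ih =>
    simp only [List.foldl_cons, List.map_cons]
    rw [ih, pvBisect_eq h]
    split_ifs <;> simp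

theorem score_nr_nights_spec : Claim_equal_score_nr_nights := by
  intro nights _
  unfold Spec_score_nr_nights score_nr_nights score_nr_nights_alt
  rw [pvFoldl_eq]
  simp
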